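-- pv_equiv track=rewrite | github.com/naveenbxyz/spexplorer | excel_extractor.py | _clean_header
-- ===== SOURCE A (Python) =====
-- from typing import Dict, List, Any, Union, Optional
--
-- def _clean_header(value: Any) -> str:
--     """
--     Clean and normalize header values.
--
--     Args:
--         value: Raw header value
--
--     Returns:
--         Cleaned header string
--     """
--     if value is None:
--         return ''
--
--     header = str(value).strip()
--
--     # Replace spaces and special characters
--     header = header.replace(' ', '_').replace('\n', '_')
--
--     # Remove multiple underscores
--     while '__' in header:
--         header = header.replace('__', '_')
--
--     return header
-- ===== SOURCE B (Python) =====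
-- def _clean_header(value):
--     """Single forward pass: strip, map ' '/'\n' to '_', collapse underscore runs inline."""
--     if value is None:
--         return ''
--     out = []
--     for ch in str(value).strip():
--         if ch == ' ' or ch == '\n':
--             ch = '_'
--         if ch == '_' and out and out[-1] == '_':
--             continue
--         out.append(ch)
--     return ''.join(out)
-- ===== Notes on version B (the rewrite author's own statement) =====
-- stated objective: alternative
-- what changed: A strips, does two whole-string replace passes and then repeatedly rescans and replaces double underscores until none remain; B builds the result in a single stateful forward pass over the stripped string, mapping space/newline characters to underscore and skipping an underscore whenever the previously emitted character is already an underscore.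
import Mathlib
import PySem

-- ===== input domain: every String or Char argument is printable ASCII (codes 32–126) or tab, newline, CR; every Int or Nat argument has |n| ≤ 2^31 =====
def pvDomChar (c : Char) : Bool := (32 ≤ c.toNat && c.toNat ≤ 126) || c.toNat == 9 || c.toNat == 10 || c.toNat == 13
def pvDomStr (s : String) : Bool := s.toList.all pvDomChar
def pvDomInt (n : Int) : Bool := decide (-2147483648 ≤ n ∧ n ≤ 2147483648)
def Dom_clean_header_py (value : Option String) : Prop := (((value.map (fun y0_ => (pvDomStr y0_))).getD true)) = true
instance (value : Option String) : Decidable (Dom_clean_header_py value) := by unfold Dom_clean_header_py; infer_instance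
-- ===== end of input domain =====

-- B replaces A's replace-then-repeated-"__"-scan with one stateful forward pass (objective: alternative single-pass formulation).

-- ===== PORT A =====
-- The next three declarations are needed by the port's termination proof (the
-- while loop runs as long as "__" occurs, and each replace("__","_") shortens).
-- pvRep1 is the proof-side characterisation of one replace('__','_') pass.
def pvRep1 : List Char → List Char
  | '_' :: '_' :: t => '_' :: pvRep1 t
  | c :: t => c :: pvRep1 t
  | [] => []

theorem pvRep1_length_le (l : List Char) : (pvRep1 l).length ≤ l.length := by
  fun_induction pvRep1 l <;> simp_all; omega

theorem pvRep1_length_lt (l : List Char) (h : ['_', '_'] <:+: l) :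
    (pvRep1 l).length < l.length := by
  fun_induction pvRep1 l with
  | case1 t ih =>
    have := pvRep1_length_le t; simp; omega
  | case2 c t hne ih =>
    rcases h with ⟨s, u, hs⟩
    rcases s with _ | ⟨a, s'⟩
    · simp at hs
      exact (hne u hs.1.symm hs.2.symm).elim
    · simp at hs
      have ht : ['_', '_'] <:+: t := ⟨s', u, by simpa using hs.2⟩
      have := ih ht
      simp; omega
  | case3 => simp at h

theorem pvReplace_go_eq_rep1 (fuel : Nat) (l acc : List Char) (h : l.length ≤ fuel) :
    PySem.Chars.replace.go ['_', '_'] ['_'] fuel l acc = acc.reverse ++ pvRep1 l := by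
  induction fuel generalizing l acc with
  | zero =>
    rw [PySem.Chars.replace.go.eq_def]; dsimp only
    have hl : l = [] := List.length_eq_zero_iff.mp (Nat.le_zero.mp h)
    subst hl; simp [pvRep1]
  | succ fuel ih =>
    match l with
    | [] => rw [PySem.Chars.replace.go.eq_def]; dsimp only; simp [pvRep1]
    | c :: t =>
      rw [PySem.Chars.replace.go.eq_def]; dsimp only
      by_cases hp : List.isPrefixOf ['_', '_'] (c :: t) = true
      · rw [if_pos hp]
        rcases t with _ | ⟨d, t'⟩
        · simp [List.isPrefixOf] at hp
        · have hc : '_' = c ∧ '_' = d := by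
            simpa [List.isPrefixOf] using hp
          rcases hc with ⟨hc1, hc2⟩
          subst hc1; subst hc2
          rw [show List.drop (['_', '_'] : List Char).length ('_' :: '_' :: t') = t' from rfl]
          rw [ih t' (['_'].reverse ++ acc) (by simp at h ⊢; omega)]
          simp [pvRep1]
      · rw [if_neg hp]
        rw [ih t (c :: acc) (by simp at h; omega)]
        rcases t with _ | ⟨d, t'⟩
        · simp [pvRep1]
        · have hnp : ¬(c = '_' ∧ d = '_') := by
            rintro ⟨rfl, rfl⟩; simp [List.isPrefixOf] at hp
          by_cases hc : c = '_' <;> by_cases hd : d = '_' <;>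
            simp_all [pvRep1]

theorem pvReplace_underscores (s : String) :
    (PySem.Str.replace s "__" "_").toList = pvRep1 s.toList := by
  rw [PySem.Str.toList_replace]
  show PySem.Chars.replace s.toList ['_', '_'] ['_'] = _
  rw [PySem.Chars.replace]
  simp only [List.isEmpty_cons]
  exact pvReplace_go_eq_rep1 _ _ _ le_rfl

-- the `while '__' in header:` loop of A, as well-founded recursion on the length
def pvALoop (s : String) : String :=
  if PySem.Str.isIn "__" s then pvALoop (PySem.Str.replace s "__" "_") else s
termination_by s.toList.length
decreasing_by
  rw [pvReplace_underscores]
  exact pvRep1_length_lt _ (by simpa using (PySem.Str.isIn_iff_infix "__" s).mp (by assumption))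

def clean_header_py (value : Option String) : String :=
  match value with
  | none => ""
  | some v =>
    let header := PySem.Str.strip v
    let header := PySem.Str.replace (PySem.Str.replace header " " "_") "\n" "_"
    pvALoop header

-- ===== PORT B =====
def clean_header_py_alt (value : Option String) : String :=
  match value with
  | none => ""
  | some v =>
    let out := (PySem.Str.strip v).toList.foldl
      (fun out ch =>
        let ch := if ch == ' ' || ch == '\n' then '_' else ch
        if ch == '_' && out.getLast? == some '_' then out else out ++ [ch])
      []
    String.ofList out

-- ===== PRECONDITION & SPEC =====
def Spec_clean_header_py (value : Option String) (out : String) : Prop := out = clean_header_py_alt value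
instance (value : Option String) (out : String) : Decidable (Spec_clean_header_py value out) := by unfold Spec_clean_header_py; infer_instance

-- ===== CLAIM (what is proved, stated in full; the proofs are below) =====
def Claim_equal_clean_header_py : Prop := ∀ (value : Option String), Dom_clean_header_py value → Spec_clean_header_py value (clean_header_py value)

-- ===== LEMMAS AND PROOFS =====

-- collapse of underscore runs: the common normal form both programs compute
def pvCollapse : List Char → List Char
  | a :: b :: rest =>
    if a = '_' ∧ b = '_' then pvCollapse (b :: rest) else a :: pvCollapse (b :: rest)
  | [a] => [a]
  | [] => []

theorem pvCollapse_cons (c : Char) (x : List Char) :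
    pvCollapse (c :: x) =
      if c = '_' ∧ x.head? = some '_' then pvCollapse x else c :: pvCollapse x := by
  rcases x with _ | ⟨d, t⟩
  · simp [pvCollapse]
  · simp [pvCollapse]

theorem pvRep1_head? (l : List Char) : (pvRep1 l).head? = l.head? := by
  fun_induction pvRep1 l <;> simp

theorem pvCollapse_rep1 (l : List Char) : pvCollapse (pvRep1 l) = pvCollapse l := by
  fun_induction pvRep1 l with
  | case1 t ih =>
    rw [pvCollapse_cons, pvCollapse_cons ('_') ('_' :: t)]
    simp only [pvRep1_head?]
    rw [pvCollapse_cons '_' t]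
    rcases ht : t.head? with _ | c
    · simp [ih]
    · by_cases hc : c = '_' <;> simp [hc, ih]
  | case2 c t hne ih =>
    rw [pvCollapse_cons, pvCollapse_cons c t]
    rw [pvRep1_head?, ih]
  | case3 => rfl

theorem pvCollapse_of_no_dunder (l : List Char) (h : ¬ (['_', '_'] <:+: l)) :
    pvCollapse l = l := by
  induction l with
  | nil => rfl
  | cons c t ih =>
    rw [pvCollapse_cons]
    have hnt : ¬ (['_', '_'] <:+: t) := fun ht => h (List.infix_cons ht)
    rw [ih hnt]
    have : ¬(c = '_' ∧ t.head? = some '_') := by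
      rintro ⟨rfl, hh⟩
      rcases t with _ | ⟨d, t'⟩
      · simp at hh
      · simp at hh
        exact h ⟨[], t', by simp [hh]⟩
    simp [this]

theorem pvALoop_eq_collapse (s : String) : (pvALoop s).toList = pvCollapse s.toList := by
  fun_induction pvALoop s with
  | case1 s h ih =>
    rw [ih, pvReplace_underscores, pvCollapse_rep1]
  | case2 s h =>
    rw [pvCollapse_of_no_dunder]
    intro hinf
    exact h ((PySem.Str.isIn_iff_infix "__" s).mpr (by simpa using hinf))

-- the character map performed by A's two single-character replaces / B's branch
def pvMapCh (c : Char) : Char := if c == ' ' || c == '\n' then '_' else c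

theorem pvReplace_single_go (o n : Char) (fuel : Nat) (l acc : List Char)
    (h : l.length ≤ fuel) :
    PySem.Chars.replace.go [o] [n] fuel l acc =
      acc.reverse ++ l.map (fun c => if c = o then n else c) := by
  induction fuel generalizing l acc with
  | zero =>
    rw [PySem.Chars.replace.go.eq_def]; dsimp only
    have hl : l = [] := List.length_eq_zero_iff.mp (Nat.le_zero.mp h)
    subst hl; simp
  | succ fuel ih =>
    match l with
    | [] => rw [PySem.Chars.replace.go.eq_def]; dsimp only; simp
    | c :: t =>
      rw [PySem.Chars.replace.go.eq_def]; dsimp only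
      by_cases hc : c = o
      · rw [if_pos (by simp [List.isPrefixOf, hc])]
        rw [show List.drop ([o] : List Char).length (c :: t) = t from rfl]
        rw [ih t ([n].reverse ++ acc) (by simp at h; omega)]
        simp [hc]
      · rw [if_neg (by simp [List.isPrefixOf]; exact fun hh => hc hh.symm)]
        rw [ih t (c :: acc) (by simp at h; omega)]
        simp [hc]

theorem pvReplace_single (s : String) (o n : Char) :
    (PySem.Str.replace s (String.ofList [o]) (String.ofList [n])).toList =
      s.toList.map (fun c => if c = o then n else c) := by
  rw [PySem.Str.toList_replace, String.toList_ofList, String.toList_ofList]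
  rw [PySem.Chars.replace]
  simp only [List.isEmpty_cons]
  exact pvReplace_single_go o n _ _ _ le_rfl

theorem pvTwo_replaces (s : String) :
    (PySem.Str.replace (PySem.Str.replace s " " "_") "\n" "_").toList =
      s.toList.map pvMapCh := by
  have h1 := pvReplace_single s ' ' '_'
  have h2 := pvReplace_single (PySem.Str.replace s " " "_") '\n' '_'
  have e1 : String.ofList [' '] = " " := by decide
  have e2 : String.ofList ['\n'] = "\n" := by decide
  have e3 : String.ofList ['_'] = "_" := by decide
  rw [e1, e3] at h1
  rw [e2, e3] at h2
  rw [h2, h1, List.map_map]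
  apply List.map_congr_left
  intro c _
  by_cases hc : c = ' ' <;> by_cases hn : c = '\n' <;> simp_all [pvMapCh]

-- B's loop body, with the "last emitted char is an underscore" flag made explicit
def pvEmit : Bool → List Char → List Char
  | _, [] => []
  | p, c :: t =>
    let c' := pvMapCh c
    if c' = '_' then (if p then pvEmit true t else '_' :: pvEmit true t)
    else c' :: pvEmit false t

theorem pvFoldl_eq_emit (l acc : List Char) :
    l.foldl
      (fun out ch =>
        let ch := if ch == ' ' || ch == '\n' then '_' else ch
        if ch == '_' && out.getLast? == some '_' then out else out ++ [ch])
      acc = acc ++ pvEmit (acc.getLast? == some '_') l := by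
  induction l generalizing acc with
  | nil => simp [pvEmit]
  | cons c t ih =>
    simp only [List.foldl_cons]
    have hb : (if (if c == ' ' || c == '\n' then '_' else c) == '_' &&
          acc.getLast? == some '_' then acc
        else acc ++ [if c == ' ' || c == '\n' then '_' else c]) =
        (if pvMapCh c == '_' && acc.getLast? == some '_' then acc
        else acc ++ [pvMapCh c]) := rfl
    rw [hb]
    by_cases hc : pvMapCh c = '_'
    · by_cases hp : acc.getLast? = some '_'
      · rw [if_pos (by simp [hc, hp]), ih acc]
        simp [pvEmit, hc, hp]
      · rw [if_neg (by simp [hc, hp]), ih (acc ++ [pvMapCh c])]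
        simp [pvEmit, hc, hp]
    · rw [if_neg (by simp [hc]), ih (acc ++ [pvMapCh c])]
      simp [pvEmit, hc]
      rw [beq_eq_false_iff_ne.mpr hc]

theorem pvEmit_eq_collapse (l : List Char) :
    pvEmit false l = pvCollapse (l.map pvMapCh) ∧
      '_' :: pvEmit true l = pvCollapse ('_' :: l.map pvMapCh) := by
  induction l with
  | nil => simp [pvEmit, pvCollapse]
  | cons c t ih =>
    by_cases hc : pvMapCh c = '_'
    · constructor
      · rw [show pvEmit false (c :: t) = '_' :: pvEmit true t by simp [pvEmit, hc]]
        rw [ih.2]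
        simp [hc]
      · rw [show pvEmit true (c :: t) = pvEmit true t by simp [pvEmit, hc]]
        rw [List.map_cons, hc, pvCollapse_cons '_' ('_' :: t.map pvMapCh)]
        simp [ih.2]
    · constructor
      · rw [show pvEmit false (c :: t) = pvMapCh c :: pvEmit false t by
            simp [pvEmit, hc]]
        rw [List.map_cons, pvCollapse_cons]
        simp [hc, ih.1]
      · rw [show pvEmit true (c :: t) = pvMapCh c :: pvEmit false t by
            simp [pvEmit, hc]]
        rw [List.map_cons, pvCollapse_cons '_' (pvMapCh c :: t.map pvMapCh)]
        rw [pvCollapse_cons (pvMapCh c)]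
        simp [hc, ih.1]

-- ===== VERDICT (by name: the statement is the Claim_ definition above) =====
theorem clean_header_py_spec : Claim_equal_clean_header_py := by
  intro value _
  unfold Spec_clean_header_py clean_header_py clean_header_py_alt
  rcases value with _ | v
  · rfl
  · simp only
    apply String.ext
    rw [pvALoop_eq_collapse, pvTwo_replaces, String.toList_ofList,
      pvFoldl_eq_emit, PySem.Str.toList_strip]
    simpa using (pvEmit_eq_collapse (PySem.Chars.strip v.toList)).1.symm
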